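-- pv_equiv track=rewrite | github.com/jonasgilje/Advent_of_Code | 2022/python/10/main.py | part2
-- ===== SOURCE A (Python) =====
-- import itertools
--
-- def part2(input_list: list[list[str]]):
--     X = 1
--     cycle_list = []
--     for instruction in input_list:
--         if instruction[0] == "noop":
--             cycle_list.append(X)
--         if instruction[0] == "addx":
--             dx = int(instruction[1])
--             cycle_list.extend((X, X))
--             X += dx
--     image = ["#" if abs(x - pos) <= 1 else "."
--              for x, pos in zip(cycle_list, itertools.cycle(range(40)))]
--     image_wrap = "\n" + "\n".join(
--         "".join(image[i:i+40]) for i in range(0, len(image), 40))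
--     return image_wrap
-- ===== SOURCE B (Python) =====
-- import itertools
--
-- def part2(input_list: list[list[str]]):
--     deltas = []
--     for instruction in input_list:
--         if instruction[0] == "noop":
--             deltas.append(0)
--         if instruction[0] == "addx":
--             deltas.extend((0, int(instruction[1])))
--     xs = list(itertools.islice(itertools.accumulate(deltas, initial=1), len(deltas)))
--     return "".join(
--         "\n" + "".join("#" if abs(x - col) <= 1 else "."
--                        for col, x in enumerate(xs[i:i+40]))
--         for i in range(0, len(xs), 40)
--     ) or "\n"
-- ===== Notes on version B (the rewrite author's own statement) =====
-- stated objective: alternative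
-- what changed: B never simulates X through the render: it flattens the instructions into a delta stream (noop -> [0], addx -> [0, dx]), obtains the per-cycle X values as prefix sums via itertools.accumulate, and renders chunk-first — each 40-wide slice of the X list is drawn with its local column index from enumerate (no modular arithmetic), rows glued by prefixing each with a newline — whereas A simulates X per instruction into cycle_list, renders globally by zipping with itertools.cycle(range(40)), then chunks the pixel strings.
import Mathlib
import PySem

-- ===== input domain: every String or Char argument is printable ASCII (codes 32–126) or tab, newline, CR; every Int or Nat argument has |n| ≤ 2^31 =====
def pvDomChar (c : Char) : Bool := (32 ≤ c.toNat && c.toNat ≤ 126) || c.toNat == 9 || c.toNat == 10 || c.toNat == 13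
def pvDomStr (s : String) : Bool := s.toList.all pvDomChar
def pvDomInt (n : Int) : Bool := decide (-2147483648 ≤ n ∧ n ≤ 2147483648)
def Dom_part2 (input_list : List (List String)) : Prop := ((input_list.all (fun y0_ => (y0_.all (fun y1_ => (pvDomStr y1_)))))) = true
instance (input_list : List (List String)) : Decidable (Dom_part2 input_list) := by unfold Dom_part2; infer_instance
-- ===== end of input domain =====

-- B computes the X value of every cycle as prefix sums (itertools.accumulate) of a flat delta
-- stream built from the instructions, then renders chunk-first, row by row with a local column
-- index; same return value as A's simulate-then-render-then-chunk.

-- ===== PORT A =====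
-- A's loop body over (X, cycle_list)
def stepA (st : Int × List Int) (instruction : List String) : Int × List Int :=
  let X := st.1
  let cycle_list := st.2
  let head := (PySem.List.pyGet? instruction 0).getD ""
  let cycle_list := if head == "noop" then cycle_list ++ [X] else cycle_list
  if head == "addx" then
    let dx := (PySem.Int.ofStr? ((PySem.List.pyGet? instruction 1).getD "")).getD 0
    (X + dx, cycle_list ++ [X, X])
  else (X, cycle_list)

def part2 (input_list : List (List String)) : String :=
  let st := input_list.foldl stepA (1, [])
  -- zip(cycle_list, itertools.cycle(range(40))): the pos paired with enumerate index i is i % 40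
  let image := (PySem.List.enumerate st.2).map
      (fun p => if |p.2 - PySem.Int.mod p.1 40| ≤ 1 then "#" else ".")
  String.append "\n" (PySem.Str.join "\n"
    ((PySem.List.pyRange 0 (image.length : Int) 40).map
      (fun i => PySem.Str.join "" (PySem.List.slice image (some i) (some (i + 40))))))

-- ===== PORT B =====
-- Source B's delta-stream loop body: noop contributes [0], addx contributes [0, dx]
def stepD (deltas : List Int) (instruction : List String) : List Int :=
  let head := (PySem.List.pyGet? instruction 0).getD ""
  let deltas := if head == "noop" then deltas ++ [0] else deltas
  if head == "addx" then
    deltas ++ [0, (PySem.Int.ofStr? ((PySem.List.pyGet? instruction 1).getD "")).getD 0]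
  else deltas

-- Source B's per-row generator: '#' if abs(x - col) <= 1 else '.' over enumerate(row)
def renderRow (row : List Int) : String :=
  PySem.Str.join "" ((PySem.List.enumerate row).map
    (fun p => if |p.2 - p.1| ≤ 1 then "#" else "."))

def part2_alt (input_list : List (List String)) : String :=
  let deltas := input_list.foldl stepD []
  -- itertools.islice(itertools.accumulate(deltas, initial=1), len(deltas))
  let xs := (deltas.scanl (fun a d => a + d) 1).take deltas.length
  let s := PySem.Str.join ""
    (((PySem.List.pyRange 0 (xs.length : Int) 40).map
        (fun i => PySem.List.slice xs (some i) (some (i + 40)))).map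
      (fun row => String.append "\n" (renderRow row)))
  if s == "" then "\n" else s

-- ===== PRECONDITION & SPEC =====
-- A raises IndexError on an empty instruction, and IndexError/ValueError on an "addx"
-- instruction without a second element that int() accepts; exactly those inputs are excluded.
def Pre_part2 (input_list : List (List String)) : Prop :=
  ∀ instruction ∈ input_list, 1 ≤ instruction.length ∧
    (instruction.getD 0 "" = "addx" →
      2 ≤ instruction.length ∧ (PySem.Int.ofStr? (instruction.getD 1 "")).isSome)
instance (input_list : List (List String)) : Decidable (Pre_part2 input_list) := by
  unfold Pre_part2; infer_instance

def pvWitness_part2 : List (List String) := [["noop"], ["addx", "3"], ["noop"]]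

def Spec_part2 (input_list : List (List String)) (out : String) : Prop := out = part2_alt input_list
instance (input_list : List (List String)) (out : String) : Decidable (Spec_part2 input_list out) := by unfold Spec_part2; infer_instance

-- ===== CLAIM (what is proved, stated in full; the proofs are below) =====
def Claim_equal_part2 : Prop := ∀ (input_list : List (List String)), Dom_part2 input_list → Pre_part2 input_list → Spec_part2 input_list (part2 input_list)

-- ===== LEMMAS AND PROOFS =====

-- shared readings of one instruction
def pvHd (i : List String) : String := (PySem.List.pyGet? i 0).getD ""
def pvDx (i : List String) : Int :=
  (PySem.Int.ofStr? ((PySem.List.pyGet? i 1).getD "")).getD 0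
-- per-instruction cycle X values, next X, and delta contribution
def pvEmit (i : List String) (X : Int) : List Int :=
  if pvHd i = "noop" then [X] else if pvHd i = "addx" then [X, X] else []
def pvNext (i : List String) (X : Int) : Int :=
  if pvHd i = "addx" then X + pvDx i else X
def pvDem (i : List String) : List Int :=
  if pvHd i = "noop" then [0] else if pvHd i = "addx" then [0, pvDx i] else []
-- the per-cycle X list starting from X
def pvRun : List (List String) → Int → List Int
  | [], _ => []
  | i :: t, X => pvEmit i X ++ pvRun t (pvNext i X)
-- the delta stream
def pvDel : List (List String) → List Int
  | [] => []
  | i :: t => pvDem i ++ pvDel t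

theorem pvStepA_eq (X : Int) (cl : List Int) (i : List String) :
    stepA (X, cl) i = (pvNext i X, cl ++ pvEmit i X) := by
  by_cases hn : pvHd i = "noop"
  · have ha : pvHd i ≠ "addx" := by rw [hn]; decide
    simp [stepA, pvHd, pvNext, pvEmit, pvDx] at *
    simp [hn]
  · by_cases ha : pvHd i = "addx"
    · simp [stepA, pvHd, pvNext, pvEmit, pvDx] at *
      simp [ha]
    · simp [stepA, pvHd, pvNext, pvEmit, pvDx] at *
      simp [hn, ha]

theorem pvFoldA (L : List (List String)) : ∀ (X : Int) (cl : List Int),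
    (L.foldl stepA (X, cl)).2 = cl ++ pvRun L X := by
  induction L with
  | nil => intro X cl; simp [pvRun]
  | cons i t ih =>
      intro X cl
      simp only [List.foldl_cons, pvStepA_eq, pvRun, ih, List.append_assoc]

theorem pvStepD_eq (acc : List Int) (i : List String) :
    stepD acc i = acc ++ pvDem i := by
  by_cases hn : pvHd i = "noop"
  · have ha : pvHd i ≠ "addx" := by rw [hn]; decide
    simp [stepD, pvHd, pvDem, pvDx] at *
    simp [hn]
  · by_cases ha : pvHd i = "addx"
    · simp [stepD, pvHd, pvDem, pvDx] at *
      simp [ha]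
    · simp [stepD, pvHd, pvDem, pvDx] at *
      simp [hn, ha]

theorem pvFoldD (L : List (List String)) : ∀ (acc : List Int),
    L.foldl stepD acc = acc ++ pvDel L := by
  induction L with
  | nil => intro acc; simp [pvDel]
  | cons i t ih =>
      intro acc
      simp only [List.foldl_cons, pvStepD_eq, pvDel, ih, List.append_assoc]

-- prefix sums of the delta stream, truncated, are exactly the per-cycle X list
theorem pvScan (L : List (List String)) : ∀ (X : Int),
    ((pvDel L).scanl (fun a d => a + d) X).take (pvDel L).length = pvRun L X := by
  induction L with
  | nil => intro X; simp [pvDel, pvRun]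
  | cons i t ih =>
      intro X
      by_cases hn : pvHd i = "noop"
      · have ha : pvHd i ≠ "addx" := by rw [hn]; decide
        simp [pvDel, pvRun, pvDem, pvEmit, pvNext, hn, List.scanl_cons, ih]
      · by_cases ha : pvHd i = "addx"
        · simp [pvDel, pvRun, pvDem, pvEmit, pvNext, ha, List.scanl_cons, ih]
        · simp [pvDel, pvRun, pvDem, pvEmit, pvNext, hn, ha, ih]

-- ===== rendering =====

theorem pvEnumDrop {α : Type} (l : List α) : ∀ (s : Int) (n : Nat),
    (PySem.List.enumerate l s).drop n = PySem.List.enumerate (l.drop n) (s + n) := by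
  induction l with
  | nil => intro s n; simp [PySem.List.enumerate]
  | cons x t ih =>
      intro s n
      cases n with
      | zero => simp
      | succ m =>
          simp only [PySem.List.enumerate_cons, List.drop_succ_cons, ih (s + 1) m]
          congr 1
          push_cast; ring

theorem pvEnumTake {α : Type} (l : List α) : ∀ (s : Int) (n : Nat),
    (PySem.List.enumerate l s).take n = PySem.List.enumerate (l.take n) s := by
  induction l with
  | nil => intro s n; simp [PySem.List.enumerate]
  | cons x t ih =>
      intro s n
      cases n with
      | zero => simp [PySem.List.enumerate]
      | succ m => simp [PySem.List.enumerate_cons, ih (s + 1) m]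

-- in a 40-wide chunk starting at global index 40k, the global index mod 40 is the local column
theorem pvShift (row : List Int) : ∀ (k c : Nat), c + row.length ≤ 40 →
    (PySem.List.enumerate row ((40 * k + c : Nat) : Int)).map
      (fun p => if |p.2 - PySem.Int.mod p.1 40| ≤ 1 then "#" else ".")
    = (PySem.List.enumerate row ((c : Nat) : Int)).map
      (fun p => if |p.2 - p.1| ≤ 1 then "#" else ".") := by
  induction row with
  | nil => intro k c _; simp [PySem.List.enumerate]
  | cons x t ih =>
      intro k c hc
      simp only [PySem.List.enumerate_cons, List.map_cons]
      have hc' : c < 40 := by simp at hc; omega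
      have hmod : PySem.Int.mod ((40 * k + c : Nat) : Int) 40 = (c : Int) := by
        have h40 : ((40 : Int)) = ((40 : Nat) : Int) := by norm_num
        rw [h40, PySem.Int.mod_natCast]
        have : (40 * k + c) % 40 = c := by omega
        rw [this]
      have hs : ((40 * k + c : Nat) : Int) + 1 = ((40 * k + (c + 1) : Nat) : Int) := by
        push_cast; ring
      have ht : ((c : Nat) : Int) + 1 = (((c + 1 : Nat)) : Int) := by push_cast; ring
      rw [hmod, hs, ht, ih k (c + 1) (by simp at hc ⊢; omega)]

-- A's range/slice chunking, for any list
theorem pvSlice40 {α : Type} (l : List α) (k : Nat) :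
    PySem.List.slice l (some (0 + 40 * (k : Int))) (some ((0 + 40 * (k : Int)) + 40)) =
      (l.drop (40 * k)).take 40 := by
  have e1 : (0 + 40 * (k : Int)) = ((40 * k : Nat) : Int) := by push_cast; ring
  rw [e1, show (((40 * k : Nat) : Int) + 40) = ((40 * k : Nat) : Int) + ((40 : Nat) : Int) from by norm_num,
     PySem.List.slice_natCast_add]

theorem pvChunks_eq {α : Type} (l : List α) :
    (PySem.List.pyRange 0 (l.length : Int) 40).map
      (fun i => PySem.List.slice l (some i) (some (i + 40))) =
    (List.range ((l.length + 39) / 40)).map (fun k => (l.drop (40 * k)).take 40) := by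
  rw [PySem.List.pyRange_of_pos _ _ (by norm_num : (0:Int) < 40), List.map_map]
  by_cases h : (0:Int) < (l.length : Int)
  · rw [if_pos h]
    have hcount : (((l.length : Int) - 0 + 40 - 1) / 40).toNat = (l.length + 39) / 40 := by
      have e : ((l.length : Int) - 0 + 40 - 1) = ((l.length + 39 : Nat) : Int) := by push_cast; ring
      rw [e, show ((40:Int)) = ((40:Nat):Int) from rfl, ← Int.natCast_div, Int.toNat_natCast]
    rw [hcount]
    apply List.map_congr_left
    intro k _
    simp only [Function.comp_apply]
    rw [pvSlice40]
  · rw [if_neg h]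
    have : l.length = 0 := by omega
    rw [this]
    simp

-- one chunk of A's image is B's rendering of the same chunk of the cycle list
theorem pvRow_eq (cl : List Int) (k : Nat) :
    PySem.Str.join ""
      ((((PySem.List.enumerate cl).map
          (fun p => if |p.2 - PySem.Int.mod p.1 40| ≤ 1 then "#" else ".")).drop (40 * k)).take 40)
    = renderRow ((cl.drop (40 * k)).take 40) := by
  rw [← List.map_drop, ← List.map_take, pvEnumDrop, pvEnumTake]
  have h0 : (0 : Int) + (40 * k : Nat) = ((40 * k + 0 : Nat) : Int) := by push_cast; ring
  rw [h0, pvShift _ k 0 (by simp)]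
  simp [renderRow]

-- glue: '\n' + sep-join vs join of '\n'-prefixed rows, on char lists
theorem pvGlueChars (L : List (List Char)) : ∀ (l : List Char),
    '\n' :: PySem.Chars.join ['\n'] (l :: L) =
      PySem.Chars.join [] ((l :: L).map (fun x => '\n' :: x)) := by
  induction L with
  | nil => intro l; simp [PySem.Chars.join_singleton]
  | cons l' T ih =>
      intro l
      have h := ih l'
      simp only [List.map_cons] at h ⊢
      rw [PySem.Chars.join_cons_cons, PySem.Chars.join_cons_cons, ← h]
      simp

theorem pvNlToList (a : String) : (String.append "\n" a).toList = '\n' :: a.toList := by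
  show ("\n" ++ a).toList = _
  simp

theorem pvGlue (R : List String) :
    String.append "\n" (PySem.Str.join "\n" R) =
      (if (PySem.Str.join "" (R.map (fun r => String.append "\n" r)) == "") then "\n"
       else PySem.Str.join "" (R.map (fun r => String.append "\n" r))) := by
  cases R with
  | nil =>
      simp [PySem.Str.join]
      exact String.toByteArray_inj.mp rfl
  | cons r T =>
      have hlist : (PySem.Str.join "" ((r :: T).map (fun r => String.append "\n" r))).toList
          = '\n' :: PySem.Chars.join ['\n'] ((r :: T).map String.toList) := by
        rw [PySem.Str.toList_join, List.map_map]
        have h0 : "".toList = ([] : List Char) := rfl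
        have : (r :: T).map (String.toList ∘ fun r => String.append "\n" r)
            = ((r :: T).map String.toList).map (fun x => '\n' :: x) := by
          simp [Function.comp, pvNlToList]
        rw [h0, this]
        exact (pvGlueChars (T.map String.toList) r.toList).symm
      have hne : (PySem.Str.join "" ((r :: T).map (fun r => String.append "\n" r)) == "") = false := by
        apply beq_eq_false_iff_ne.mpr
        intro h
        rw [h] at hlist
        simp at hlist
      rw [hne, if_neg (by simp)]
      apply String.ext
      show (String.append "\n" (PySem.Str.join "\n" (r :: T))).toList
          = (PySem.Str.join "" ((r :: T).map (fun r => String.append "\n" r))).toList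
      rw [hlist]
      simp [PySem.Str.toList_join, pvNlToList]

-- ===== VERDICT (by name: the statement is the Claim_ definition above) =====
theorem part2_spec : Claim_equal_part2 := by
  intro input_list _ _
  show Spec_part2 input_list (part2 input_list)
  unfold Spec_part2
  simp only [part2, part2_alt]
  rw [pvFoldA, pvFoldD, List.nil_append, List.nil_append, pvScan]
  set cl := pvRun input_list 1 with hcl
  have hA := congrArg (List.map (fun ch : List String => PySem.Str.join "" ch))
      (pvChunks_eq (List.map (fun p : Int × Int => if |p.2 - PySem.Int.mod p.1 40| ≤ 1 then "#" else ".")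
        (PySem.List.enumerate cl)))
  have hB := congrArg (List.map (fun row : List Int => String.append "\n" (renderRow row)))
      (pvChunks_eq cl)
  simp only [List.map_map, Function.comp_def] at hA hB
  rw [hA]
  simp only [List.map_map, Function.comp_def]
  rw [hB]
  have hlen : (List.map (fun p : Int × Int => if |p.2 - PySem.Int.mod p.1 40| ≤ 1 then "#" else ".")
      (PySem.List.enumerate cl)).length = cl.length := by
    rw [List.length_map, PySem.List.length_enumerate]
  rw [hlen]
  have hrows : (List.range ((cl.length + 39) / 40)).map
      (fun k => PySem.Str.join ""
        (((List.map (fun p : Int × Int => if |p.2 - PySem.Int.mod p.1 40| ≤ 1 then "#" else ".")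
            (PySem.List.enumerate cl)).drop (40 * k)).take 40))
      = (List.range ((cl.length + 39) / 40)).map (fun k => renderRow ((cl.drop (40 * k)).take 40)) := by
    apply List.map_congr_left
    intro k _
    exact pvRow_eq cl k
  rw [hrows]
  have hBmap : (List.range ((cl.length + 39) / 40)).map
        (fun k => String.append "\n" (renderRow ((cl.drop (40 * k)).take 40)))
      = ((List.range ((cl.length + 39) / 40)).map
          (fun k => renderRow ((cl.drop (40 * k)).take 40))).map (fun r => String.append "\n" r) := by
    rw [List.map_map]
    simp [Function.comp_def]
  rw [hBmap]
  exact pvGlue _
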